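-- pv_equiv track=rewrite | github.com/Wiecheversplash/AED1-FCEN | Guias/Guia 8/Guia 8.py | reemplazaVocales
-- ===== SOURCE A (Python) =====
-- def pertenece(x,y)->bool:
--     return x in y
--
-- def reemplazaVocales(a:str)->str:
--     b:list = []
--     a:list = list(a)
--     for i in range(0,len(a)):
--         if (pertenece(a[i],list("AEIOUaeiou"))):
--             b.append("-")
--         else:
--             b.append(a[i])
--     c:str = ""
--     for letra in b:
--         c+=letra
--     return c
-- ===== SOURCE B (Python) =====
-- _TABLE = str.maketrans('AEIOUaeiou', '-' * 10)
--
-- def reemplazaVocales(a: str) -> str: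
--     return a.translate(_TABLE)
-- ===== Notes on version B (the rewrite author's own statement) =====
-- stated objective: idiomatic
-- what changed: Replaced the index loop with membership test plus explicit string concatenation by a precomputed translation table applied in one str.translate pass.
import Mathlib
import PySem

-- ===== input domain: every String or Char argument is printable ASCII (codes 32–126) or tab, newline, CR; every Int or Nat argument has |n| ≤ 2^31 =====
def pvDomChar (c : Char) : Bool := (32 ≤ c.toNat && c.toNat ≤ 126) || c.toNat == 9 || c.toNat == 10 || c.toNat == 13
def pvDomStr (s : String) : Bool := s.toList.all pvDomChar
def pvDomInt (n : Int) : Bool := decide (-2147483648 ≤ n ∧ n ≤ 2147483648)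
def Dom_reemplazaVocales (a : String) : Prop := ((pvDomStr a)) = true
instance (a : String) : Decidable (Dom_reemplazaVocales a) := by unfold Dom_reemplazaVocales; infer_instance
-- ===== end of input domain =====

-- B replaces A's index loop (membership test + string concatenation) by a precomputed
-- translation table applied in a single lookup pass (Python str.translate); idiomatic.

-- ===== PORT A =====
def pertenece (x : Char) (y : List Char) : Bool := y.contains x

def reemplazaVocales (a : String) : String :=
  let al : List Char := a.toList
  let b : List Char :=
    (PySem.List.pyRange 0 al.length 1).foldl
      (fun b i =>
        if pertenece (PySem.List.pyGetD al i ' ') ("AEIOUaeiou".toList) then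
          b ++ ['-']
        else
          b ++ [PySem.List.pyGetD al i ' ']) []
  let c : String := b.foldl (fun c letra => c ++ String.ofList [letra]) ""
  c

-- ===== PORT B =====
-- the translation table str.maketrans('AEIOUaeiou', '-'*10) builds: vowel → '-'
def pvTable : List (Char × Char) := "AEIOUaeiou".toList.map (fun v => (v, '-'))

def reemplazaVocales_alt (a : String) : String :=
  String.ofList (a.toList.map (fun c => (pvTable.lookup c).getD c))

-- ===== PRECONDITION & SPEC =====
def Spec_reemplazaVocales (a : String) (out : String) : Prop := out = reemplazaVocales_alt a
instance (a : String) (out : String) : Decidable (Spec_reemplazaVocales a out) := by unfold Spec_reemplazaVocales; infer_instance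

-- ===== CLAIM (what is proved, stated in full; the proofs are below) =====
def Claim_equal_reemplazaVocales : Prop := ∀ (a : String), Dom_reemplazaVocales a → Spec_reemplazaVocales a (reemplazaVocales a)

-- ===== LEMMAS AND PROOFS =====
-- lookup in a 'map every v to (v, '-')' table = membership test
theorem lookup_map_dash (l : List Char) (c : Char) :
    (l.map (fun v => (v, '-'))).lookup c = if l.contains c then some '-' else none := by
  induction l with
  | nil => simp
  | cons h t ih =>
      simp only [List.map_cons, List.lookup_cons, List.contains_cons]
      by_cases hc : c = h
      · simp [hc]
      · have hb : (c == h) = false := by simp [hc]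
        rw [hb]
        simp [ih]

-- per-character: B's table lookup agrees with A's membership branch
theorem lookup_table_eq (c : Char) :
    (pvTable.lookup c).getD c = (if pertenece c ("AEIOUaeiou".toList) then '-' else c) := by
  simp only [pvTable, lookup_map_dash, pertenece]
  split_ifs <;> simp

-- A's index loop over range(len(a)) is a map over the character list
theorem loopA_eq (al : List Char) (init : List Char) :
    (PySem.List.pyRange 0 al.length 1).foldl
      (fun b i =>
        if pertenece (PySem.List.pyGetD al i ' ') ("AEIOUaeiou".toList) then b ++ ['-']
        else b ++ [PySem.List.pyGetD al i ' ']) init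
    = init ++ al.map (fun c => if pertenece c ("AEIOUaeiou".toList) then '-' else c) := by
  have h := PySem.List.foldl_pyRange_zero_pyGetD' al ' '
      (fun (b : List Char) (c : Char) =>
        if pertenece c ("AEIOUaeiou".toList) then b ++ ['-'] else b ++ [c]) init
  rw [show ((al.length : Int)) = ((al.length : Nat) : Int) from rfl] at h
  rw [h]
  clear h
  induction al generalizing init with
  | nil => simp
  | cons h t ih =>
      simp only [List.foldl_cons, List.map_cons]
      rw [ih]
      split_ifs <;> simp

-- A's concatenation loop rebuilds the string of its character list
theorem loopC_eq (b : List Char) (s : List Char) :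
    b.foldl (fun c letra => c ++ String.ofList [letra]) (String.ofList s) = String.ofList (s ++ b) := by
  induction b generalizing s with
  | nil => simp
  | cons h t ih =>
      simp only [List.foldl_cons]
      rw [show String.ofList s ++ String.ofList [h] = String.ofList (s ++ [h]) from by simp, ih]
      simp

-- ===== VERDICT (by name: the statement is the Claim_ definition above) =====
theorem reemplazaVocales_spec : Claim_equal_reemplazaVocales := by
  intro a _
  unfold Spec_reemplazaVocales reemplazaVocales reemplazaVocales_alt
  simp only [loopA_eq, List.nil_append]
  rw [show ("" : String) = String.ofList [] from rfl, loopC_eq]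
  simp [lookup_table_eq]
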